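-- pv_equiv track=rewrite | github.com/lucian-ilie/E-score | full_test_example/testing_code.py | aligned_to_indexed
-- ===== SOURCE A (Python) =====
-- def aligned_to_indexed(seqs):
--   no_dash = []
--   positions = []
--   for seq in seqs:
--     no_dash.append(seq.replace("-" , ""))
--     pos = []
--     for i , char in enumerate(seq):
--       if char != "-":
--         pos.append(i)
--     positions.append(pos)
--
--   return no_dash, positions
-- ===== SOURCE B (Python) =====
-- def aligned_to_indexed(seqs):
--     no_dash = []
--     positions = []
--     for seq in seqs:
--         chars = []
--         pos = []
--         for i in range(len(seq) - 1, -1, -1):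
--             c = seq[i]
--             if c != "-":
--                 chars.append(c)
--                 pos.append(i)
--         chars.reverse()
--         pos.reverse()
--         no_dash.append("".join(chars))
--         positions.append(pos)
--     return no_dash, positions
-- ===== Notes on version B (the rewrite author's own statement) =====
-- stated objective: alternative
-- what changed: Each sequence is traversed once, backwards over indices, by a single fused loop that accumulates both the kept characters and their positions into one state and reverses the two lists at the end, replacing A's two independent forward passes (str.replace plus an enumerate loop).
import Mathlib
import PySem

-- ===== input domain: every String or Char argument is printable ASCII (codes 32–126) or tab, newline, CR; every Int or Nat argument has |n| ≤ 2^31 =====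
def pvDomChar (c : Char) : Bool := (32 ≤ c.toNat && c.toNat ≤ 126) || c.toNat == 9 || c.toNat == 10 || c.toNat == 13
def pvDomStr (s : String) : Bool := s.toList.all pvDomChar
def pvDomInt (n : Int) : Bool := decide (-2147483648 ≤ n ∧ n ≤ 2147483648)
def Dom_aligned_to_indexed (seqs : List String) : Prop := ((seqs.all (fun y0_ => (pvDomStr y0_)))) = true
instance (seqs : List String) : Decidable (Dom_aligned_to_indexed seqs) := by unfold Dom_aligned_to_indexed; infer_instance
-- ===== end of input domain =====

-- B makes a single fused backward pass per sequence, accumulating kept characters and their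
-- positions in one state and reversing at the end, instead of A's two independent forward
-- passes (str.replace and an enumerate loop) ('alternative': same cost, different traversal).

-- ===== PORT A =====
def aligned_to_indexed (seqs : List String) : List String × List (List Int) :=
  seqs.foldl (fun acc seq =>
    (acc.1 ++ [PySem.Str.replace seq "-" ""],
     acc.2 ++ [(PySem.List.enumerate seq.toList 0).foldl
       (fun ps p => if p.2 ≠ '-' then ps ++ [p.1] else ps) []])) ([], [])

-- ===== PORT B =====
-- seq[i] with i always in range → pyGetD is exact here
def aligned_to_indexed_alt (seqs : List String) : List String × List (List Int) :=
  seqs.foldl (fun acc seq =>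
    let cs := seq.toList
    let st := (PySem.List.pyRange ((cs.length : Int) - 1) (-1) (-1)).foldl
      (fun st i =>
        let c := PySem.List.pyGetD cs i ' '
        if c ≠ '-' then (st.1 ++ [c], st.2 ++ [i]) else st)
      (([] : List Char), ([] : List Int))
    (acc.1 ++ [String.ofList st.1.reverse], acc.2 ++ [st.2.reverse])) ([], [])

-- ===== PRECONDITION & SPEC =====
def Spec_aligned_to_indexed (seqs : List String) (out : List String × List (List Int)) : Prop := out = aligned_to_indexed_alt seqs
instance (seqs : List String) (out : List String × List (List Int)) : Decidable (Spec_aligned_to_indexed seqs out) := by unfold Spec_aligned_to_indexed; infer_instance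

-- ===== CLAIM =====
def Claim_equal_aligned_to_indexed : Prop := ∀ (seqs : List String), Dom_aligned_to_indexed seqs → Spec_aligned_to_indexed seqs (aligned_to_indexed seqs)

-- ===== LEMMAS AND PROOFS =====

-- replace.go with old = "-", new = "" is a bounded-fuel filter
theorem pv_go_dash (l : List Char) : ∀ (acc : List Char) (fuel : Nat), l.length ≤ fuel →
    PySem.Chars.replace.go ['-'] [] fuel l acc = acc.reverse ++ l.filter (· != '-') := by
  induction l with
  | nil =>
    intro acc fuel _
    cases fuel <;> simp [PySem.Chars.replace.go]
  | cons c t ih =>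
    intro acc fuel hf
    cases fuel with
    | zero => simp at hf
    | succ n =>
      rw [PySem.Chars.replace.go]
      by_cases hc : c = '-'
      · subst hc
        simp [List.isPrefixOf, ih acc n (by simpa using hf)]
      · have hpre : List.isPrefixOf ['-'] (c :: t) = false := by
          simp [List.isPrefixOf]; exact fun h => (hc h.symm).elim
        rw [hpre]
        simp only [Bool.false_eq_true, if_false]
        rw [ih (c :: acc) n (by simpa using hf)]
        simp [hc]

theorem pv_replace_dash (cs : List Char) :
    PySem.Chars.replace cs ['-'] [] = cs.filter (· != '-') := by
  rw [PySem.Chars.replace]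
  simp [pv_go_dash cs [] cs.length le_rfl]

-- A's inner loop equals the filter-map over the same enumerate list
theorem pv_pos_eq (cs : List Char) :
    (PySem.List.enumerate cs 0).foldl (fun ps p => if p.2 ≠ '-' then ps ++ [p.1] else ps) []
      = ((PySem.List.enumerate cs 0).filter (fun p => p.2 != '-')).map (·.1) := by
  have h : ∀ (l : List (Int × Char)) (acc : List Int),
      l.foldl (fun ps p => if p.2 ≠ '-' then ps ++ [p.1] else ps) acc
        = acc ++ (l.filter (fun p => p.2 != '-')).map (·.1) := by
    intro l
    induction l with
    | nil => simp
    | cons p t ih =>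
      intro acc
      simp only [List.foldl_cons]
      by_cases hp : p.2 = '-'
      · rw [if_neg (by simp [hp]), ih, List.filter_cons_of_neg (by simp [hp])]
      · rw [if_pos hp, ih, List.filter_cons_of_pos (by simp [hp])]
        simp
  simpa using h (PySem.List.enumerate cs 0) []

-- B's fused loop over any index list is a pair of filter-maps
theorem pv_fused (cs : List Char) (l : List Int) : ∀ (a : List Char) (b : List Int),
    l.foldl (fun st i =>
        if PySem.List.pyGetD cs i ' ' ≠ '-'
        then (st.1 ++ [PySem.List.pyGetD cs i ' '], st.2 ++ [i]) else st) (a, b)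
      = (a ++ (l.filter (fun i => PySem.List.pyGetD cs i ' ' != '-')).map
            (fun i => PySem.List.pyGetD cs i ' '),
         b ++ l.filter (fun i => PySem.List.pyGetD cs i ' ' != '-')) := by
  induction l with
  | nil => simp
  | cons i t ih =>
    intro a b
    simp only [List.foldl_cons]
    by_cases hi : PySem.List.pyGetD cs i ' ' = '-'
    · rw [if_neg (by simp [hi]), ih, List.filter_cons_of_neg (by simp [hi])]
    · rw [if_pos hi, ih, List.filter_cons_of_pos (by simp [hi])]
      simp

-- the backward index range is the reverse of the forward one
theorem pv_range_rev (n : Nat) :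
    PySem.List.pyRange ((n : Int) - 1) (-1) (-1)
      = (PySem.List.pyRange 0 (n : Int) 1).reverse := by
  rw [PySem.List.pyRange_neg_one_eq_reverse]
  norm_num

-- enumerate as a map over the forward index range
theorem pv_enum_filter (cs : List Char) :
    (PySem.List.enumerate cs 0).filter (fun p => p.2 != '-')
      = ((PySem.List.pyRange 0 (cs.length : Int) 1).filter
          (fun j => PySem.List.pyGetD cs j ' ' != '-')).map
          (fun j => (j, PySem.List.pyGetD cs j ' ')) := by
  rw [PySem.List.enumerate_eq_map_pyRange (d := ' '), List.filter_map]
  rfl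

-- filtered characters of the forward range are the no-dash characters
theorem pv_chars_eq (cs : List Char) :
    ((PySem.List.pyRange 0 (cs.length : Int) 1).filter
        (fun j => PySem.List.pyGetD cs j ' ' != '-')).map
        (fun j => PySem.List.pyGetD cs j ' ')
      = cs.filter (· != '-') := by
  have h : cs.filter (· != '-')
      = ((PySem.List.enumerate cs 0).filter (fun p => p.2 != '-')).map (·.2) := by
    conv_lhs => rw [← PySem.List.map_snd_enumerate (xs := cs) (s := 0)]
    rw [List.filter_map]
    rfl
  rw [h, pv_enum_filter, List.map_map]
  rfl

-- per-sequence closed forms for B's fused backward loop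
theorem pv_alt_chars (cs : List Char) :
    (((PySem.List.pyRange ((cs.length : Int) - 1) (-1) (-1)).foldl
        (fun st i =>
          if PySem.List.pyGetD cs i ' ' ≠ '-'
          then (st.1 ++ [PySem.List.pyGetD cs i ' '], st.2 ++ [i]) else st)
        (([] : List Char), ([] : List Int))).1).reverse
      = cs.filter (· != '-') := by
  rw [pv_fused, pv_range_rev]
  simp only [List.filter_reverse, List.map_reverse, List.reverse_reverse, List.nil_append]
  exact pv_chars_eq cs

theorem pv_alt_pos (cs : List Char) :
    (((PySem.List.pyRange ((cs.length : Int) - 1) (-1) (-1)).foldl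
        (fun st i =>
          if PySem.List.pyGetD cs i ' ' ≠ '-'
          then (st.1 ++ [PySem.List.pyGetD cs i ' '], st.2 ++ [i]) else st)
        (([] : List Char), ([] : List Int))).2).reverse
      = ((PySem.List.enumerate cs 0).filter (fun p => p.2 != '-')).map (·.1) := by
  rw [pv_fused, pv_range_rev]
  simp only [List.filter_reverse, List.reverse_reverse, List.nil_append]
  rw [pv_enum_filter, List.map_map]
  exact (List.map_congr_left (fun _ _ => rfl)).trans (List.map_id _) |>.symm

-- A's outer fold, in closed form
theorem pv_foldl_A (seqs : List String) : ∀ (a : List String) (b : List (List Int)),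
    seqs.foldl (fun acc seq =>
      (acc.1 ++ [PySem.Str.replace seq "-" ""],
       acc.2 ++ [(PySem.List.enumerate seq.toList 0).foldl
         (fun ps p => if p.2 ≠ '-' then ps ++ [p.1] else ps) []])) (a, b)
      = (a ++ seqs.map (fun s => String.ofList (s.toList.filter (· != '-'))),
         b ++ seqs.map (fun s =>
           ((PySem.List.enumerate s.toList 0).filter (fun p => p.2 != '-')).map (·.1))) := by
  induction seqs with
  | nil => simp
  | cons s t ih =>
    intro a b
    simp only [List.foldl_cons]
    rw [ih, pv_pos_eq]
    have hrep : PySem.Str.replace s "-" "" = String.ofList (s.toList.filter (· != '-')) := by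
      show String.ofList (PySem.Chars.replace s.toList "-".toList "".toList) = _
      rw [show ("-" : String).toList = ['-'] from rfl, show ("" : String).toList = [] from rfl,
        pv_replace_dash]
    rw [hrep]
    simp

-- B's outer fold, in the same closed form
theorem pv_foldl_B (seqs : List String) : ∀ (a : List String) (b : List (List Int)),
    seqs.foldl (fun acc seq =>
      let cs := seq.toList
      let st := (PySem.List.pyRange ((cs.length : Int) - 1) (-1) (-1)).foldl
        (fun st i =>
          let c := PySem.List.pyGetD cs i ' '
          if c ≠ '-' then (st.1 ++ [c], st.2 ++ [i]) else st)
        (([] : List Char), ([] : List Int))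
      (acc.1 ++ [String.ofList st.1.reverse], acc.2 ++ [st.2.reverse])) (a, b)
      = (a ++ seqs.map (fun s => String.ofList (s.toList.filter (· != '-'))),
         b ++ seqs.map (fun s =>
           ((PySem.List.enumerate s.toList 0).filter (fun p => p.2 != '-')).map (·.1))) := by
  induction seqs with
  | nil => simp
  | cons s t ih =>
    intro a b
    simp only [List.foldl_cons]
    rw [ih, pv_alt_chars, pv_alt_pos]
    simp

-- ===== VERDICT =====
theorem aligned_to_indexed_spec : Claim_equal_aligned_to_indexed := by
  intro seqs _
  show aligned_to_indexed seqs = aligned_to_indexed_alt seqs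
  rw [aligned_to_indexed, aligned_to_indexed_alt, pv_foldl_A seqs [] [], pv_foldl_B seqs [] []]
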